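-- pv_equiv track=rewrite | github.com/jour23ab/MA | Capital IQ & Yahoo Finance Data Cleaning/06_calc_event_returns_merge_fama_french_factors.py | has_five_sequential_zeros
-- ===== SOURCE A (Python) =====
-- def has_five_sequential_zeros(series):
--     """Check if a Pandas Series contains 3 or more sequential zeros."""
--     zero_streak = 0
--     for value in series:
--         if value == 0:
--             zero_streak += 1
--             if zero_streak >= 3:
--                 return True
--         else:
--             zero_streak = 0
--     return False
-- ===== SOURCE B (Python) =====
-- def has_five_sequential_zeros(series):
--     """Check if a Pandas Series contains 3 or more sequential zeros."""
--     flags = [value == 0 for value in series]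
--     runs = []
--     i, n = 0, len(flags)
--     while i < n:
--         j = i + 1
--         while j < n and flags[j] == flags[i]:
--             j += 1
--         runs.append((flags[i], j - i))
--         i = j
--     return any(b and count >= 3 for b, count in runs)
-- ===== Notes on version B (the rewrite author's own statement) =====
-- stated objective: alternative
-- what changed: B maps each element to a zero-flag, groups the flag sequence into maximal runs (run-length encoding), and then checks whether any True-run has length >= 3, instead of A's running counter with early exit.
import Mathlib
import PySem

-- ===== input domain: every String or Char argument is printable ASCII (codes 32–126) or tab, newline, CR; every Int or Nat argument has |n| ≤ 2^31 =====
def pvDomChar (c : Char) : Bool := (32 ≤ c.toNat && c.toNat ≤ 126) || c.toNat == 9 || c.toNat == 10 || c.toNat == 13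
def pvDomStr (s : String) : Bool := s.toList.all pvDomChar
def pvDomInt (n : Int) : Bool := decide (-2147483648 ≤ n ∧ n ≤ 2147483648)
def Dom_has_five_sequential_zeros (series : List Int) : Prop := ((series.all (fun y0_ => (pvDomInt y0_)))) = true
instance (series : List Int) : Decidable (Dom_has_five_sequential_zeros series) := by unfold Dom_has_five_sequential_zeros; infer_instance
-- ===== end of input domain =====

-- B replaces A's running zero-streak counter with run-length encoding of the zero-flag
-- sequence followed by an any-run-long-enough check (alternative decomposition, same cost).


-- ===== PORT A =====
-- A's for-loop with early return: structural recursion carrying the zero_streak counter.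
def goA : List Int → Nat → Bool
  | [], _ => false
  | value :: rest, zero_streak =>
    if value == 0 then
      if zero_streak + 1 ≥ 3 then true
      else goA rest (zero_streak + 1)
    else goA rest 0

def has_five_sequential_zeros (series : List Int) : Bool := goA series 0

-- ===== PORT B =====
-- B's inner while loop: extend the current run (b, n) while the next flag equals b,
-- otherwise emit the run and start a new one.
def runsAux : Bool → Nat → List Bool → List (Bool × Nat)
  | b, n, [] => [(b, n)]
  | b, n, x :: xs => if x == b then runsAux b (n + 1) xs else (b, n) :: runsAux x 1 xs

-- B's outer while loop: run-length encode the flag list.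
def runsOf : List Bool → List (Bool × Nat)
  | [] => []
  | b :: rest => runsAux b 1 rest

def has_five_sequential_zeros_alt (series : List Int) : Bool :=
  let flags := series.map (fun value => value == 0)
  (runsOf flags).any (fun p => p.1 && decide (3 ≤ p.2))

-- ===== PRECONDITION & SPEC =====
def Spec_has_five_sequential_zeros (series : List Int) (out : Bool) : Prop := out = has_five_sequential_zeros_alt series
instance (series : List Int) (out : Bool) : Decidable (Spec_has_five_sequential_zeros series out) := by unfold Spec_has_five_sequential_zeros; infer_instance

-- ===== CLAIM (what is proved, stated in full; the proofs are below) =====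
def Claim_equal_has_five_sequential_zeros : Prop := ∀ (series : List Int), Dom_has_five_sequential_zeros series → Spec_has_five_sequential_zeros series (has_five_sequential_zeros series)

-- ===== LEMMAS AND PROOFS =====

def pRun (p : Bool × Nat) : Bool := p.1 && decide (3 ≤ p.2)

-- once a true-run has already reached length 3, B's check succeeds
theorem auxTrue_ge3 : ∀ (M : List Bool) (n : Nat), 3 ≤ n → (runsAux true n M).any pRun = true := by
  intro M
  induction M with
  | nil => intro n h; simp [runsAux, pRun, h]
  | cons x xs ih =>
    intro n h
    cases x with
    | true => simpa [runsAux] using ih (n + 1) (by omega)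
    | false => simp [runsAux, pRun, h]

-- invariant tying A's streak counter to B's current run state
theorem goA_runsAux : ∀ (rest : List Int),
    (∀ n : Nat, 1 ≤ n → n ≤ 2 →
      goA rest n = (runsAux true n (rest.map (fun v => v == 0))).any pRun)
    ∧ (∀ m : Nat,
      goA rest 0 = (runsAux false m (rest.map (fun v => v == 0))).any pRun) := by
  intro rest
  induction rest with
  | nil =>
    constructor
    · intro n h1 h2
      have : ¬ (3 ≤ n) := by omega
      simp [goA, runsAux, pRun, this]
    · intro m; simp [goA, runsAux, pRun]
  | cons v r ih =>
    constructor
    · intro n h1 h2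
      by_cases hv : v = 0
      · have hb : (v == 0) = true := by simp [hv]
        by_cases h3 : n + 1 ≥ 3
        · have hn : n = 2 := by omega
          subst hn
          simp only [goA, List.map_cons, hb, if_pos hv, if_pos h3, runsAux, if_pos rfl]
          exact (auxTrue_ge3 _ 3 (by omega)).symm
        · simp only [goA, List.map_cons, hb, if_pos hv, if_neg h3]
          rw [ih.1 (n + 1) (by omega) (by omega)]
          simp [runsAux]
      · have hb : (v == 0) = false := by simp [hv]
        have hnot3 : ¬ (3 ≤ n) := by omega
        simp only [goA, List.map_cons, if_neg hv, hb]
        rw [ih.2 1]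
        simp [runsAux, pRun, hnot3]
    · intro m
      by_cases hv : v = 0
      · have hb : (v == 0) = true := by simp [hv]
        simp only [goA, List.map_cons, if_pos hv, hb]
        have h3 : ¬ (0 + 1 ≥ 3) := by omega
        rw [if_neg h3, ih.1 1 (by omega) (by omega)]
        simp [runsAux, pRun]
      · have hb : (v == 0) = false := by simp [hv]
        simp only [goA, List.map_cons, if_neg hv, hb]
        rw [ih.2 (m + 1)]
        simp [runsAux]

-- ===== VERDICT (by name: the statement is the Claim_ definition above) =====
theorem has_five_sequential_zeros_spec : Claim_equal_has_five_sequential_zeros := by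
  intro series _
  unfold Spec_has_five_sequential_zeros has_five_sequential_zeros has_five_sequential_zeros_alt
  cases series with
  | nil => simp [goA, runsOf]
  | cons v r =>
    by_cases hv : v = 0
    · have : goA (v :: r) 0 = goA r 1 := by simp [goA, hv]
      rw [this]
      simp only [List.map_cons, runsOf]
      rw [(goA_runsAux r).1 1 (by omega) (by omega)]
      have hb : (v == 0) = true := by simp [hv]
      rw [hb]; rfl
    · have : goA (v :: r) 0 = goA r 0 := by
        simp only [goA]; rw [if_neg (by simpa using hv)]
      rw [this]
      simp only [List.map_cons, runsOf]
      rw [(goA_runsAux r).2 1]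
      have hb : (v == 0) = false := by simp [hv]
      rw [hb]; rfl
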